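-- pv_equiv track=rewrite | github.com/yorry2101/HitandBlow | parent_judge.py | judge_cards
-- ===== SOURCE A (Python) =====
-- def judge_cards(answer_cards: list[str], guess_cards: list[str]) -> tuple[int, int]:
--     """
--     Hit & Blow の判定を行う（カード版）
--     answer_cards: 正解カードのリスト（例: ["1", "2", "3", "4"]）
--     guess_cards:  入力カードのリスト（例: ["1", "3", "2", "5"]）
--     return: (hit, blow)
--     """
--
--     if len(answer_cards) != len(guess_cards):
--         raise ValueError("answer_cards と guess_cards の長さが一致していません。")
--
--     # Hit（位置も値も一致）
--     hit = sum(a == g for a, g in zip(answer_cards, guess_cards))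
--
--     # Blow（値は一致するが位置が違う）
--     from collections import Counter
--     a_cnt = Counter(answer_cards)
--     g_cnt = Counter(guess_cards)
--
--     common = sum(min(a_cnt[d], g_cnt[d]) for d in g_cnt)
--     blow = common - hit
--
--     return hit, blow
-- ===== SOURCE B (Python) =====
-- def judge_cards(answer_cards: list[str], guess_cards: list[str]) -> tuple[int, int]:
--     if len(answer_cards) != len(guess_cards):
--         raise ValueError("answer_cards と guess_cards の長さが一致していません。")
--     hit = 0
--     leftover = {}
--     unmatched = []
--     for a, g in zip(answer_cards, guess_cards):
--         if a == g:
--             hit += 1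
--         else:
--             leftover[a] = leftover.get(a, 0) + 1
--             unmatched.append(g)
--     blow = 0
--     for g in unmatched:
--         n = leftover.get(g, 0)
--         if n > 0:
--             leftover[g] = n - 1
--             blow += 1
--     return hit, blow
-- ===== Notes on version B (the rewrite author's own statement) =====
-- stated objective: alternative
-- what changed: Replaces the two Counters and the sum(min(a_cnt,g_cnt)) - hit arithmetic with a single classifying pass over zip(answer, guess) that counts hits and builds a leftover pool of unmatched answer symbols, then a consumption loop that decrements the pool once per unmatched guess symbol to count blows directly.
import Mathlib
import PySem

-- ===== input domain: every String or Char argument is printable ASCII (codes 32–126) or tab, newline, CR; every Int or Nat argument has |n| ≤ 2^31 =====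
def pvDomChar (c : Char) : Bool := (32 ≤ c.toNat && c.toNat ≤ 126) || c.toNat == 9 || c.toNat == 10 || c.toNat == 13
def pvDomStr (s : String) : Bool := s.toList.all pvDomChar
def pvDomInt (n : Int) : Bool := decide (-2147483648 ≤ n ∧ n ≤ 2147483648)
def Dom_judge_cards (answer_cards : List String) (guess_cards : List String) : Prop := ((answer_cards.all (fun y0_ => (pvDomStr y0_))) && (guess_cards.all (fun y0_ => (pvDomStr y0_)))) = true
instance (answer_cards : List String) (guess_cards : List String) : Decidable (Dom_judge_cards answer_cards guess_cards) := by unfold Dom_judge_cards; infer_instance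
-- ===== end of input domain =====

-- B replaces A's two Counters and the sum(min(...)) - hit arithmetic by a single classifying pass
-- (hits + a leftover pool of unmatched answer symbols) followed by a pool-consumption loop that
-- counts blows directly; same cost, different decomposition (objective: alternative).

-- ===== PORT A =====
def judge_cards (answer_cards : List String) (guess_cards : List String) : Int × Int :=
  -- 'raise ValueError' when the lengths differ: excluded by Pre_judge_cards
  let hit : Int := ((answer_cards.zip guess_cards).map (fun p => if p.1 == p.2 then (1 : Int) else 0)).sum
  let a_cnt := PySem.Dict.counter answer_cards
  let g_cnt := PySem.Dict.counter guess_cards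
  let common : Int := (g_cnt.keys.map (fun d => min (a_cnt.getD d 0) (g_cnt.getD d 0))).sum
  (hit, common - hit)

-- ===== PORT B =====
-- body of B's first loop: classify one zipped position into (hit count, leftover pool, unmatched guesses)
def pvClassifyStep (acc : Int × PySem.Dict String Int × List String) (p : String × String) :
    Int × PySem.Dict String Int × List String :=
  if p.1 == p.2 then (acc.1 + 1, acc.2.1, acc.2.2)
  else (acc.1, acc.2.1.insert p.1 (acc.2.1.getD p.1 0 + 1), acc.2.2 ++ [p.2])

def pvClassify (pairs : List (String × String)) : Int × PySem.Dict String Int × List String :=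
  pairs.foldl pvClassifyStep (0, PySem.Dict.empty, [])

-- body of B's second loop: consume the pool once per unmatched guess symbol, counting blows
def pvConsumeStep (st : PySem.Dict String Int × Int) (g : String) : PySem.Dict String Int × Int :=
  let n := st.1.getD g 0
  if 0 < n then (st.1.insert g (n - 1), st.2 + 1) else st

def pvConsume (unmatched : List String) (leftover : PySem.Dict String Int) : PySem.Dict String Int × Int :=
  unmatched.foldl pvConsumeStep (leftover, 0)

def judge_cards_alt (answer_cards : List String) (guess_cards : List String) : Int × Int :=
  let c := pvClassify (answer_cards.zip guess_cards)
  (c.1, (pvConsume c.2.2 c.2.1).2)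

-- ===== PRECONDITION & SPEC =====
-- A raises ValueError when the two lists have different lengths; Pre_ excludes exactly those inputs.
def Pre_judge_cards (answer_cards : List String) (guess_cards : List String) : Prop :=
  answer_cards.length = guess_cards.length
instance (answer_cards : List String) (guess_cards : List String) : Decidable (Pre_judge_cards answer_cards guess_cards) := by unfold Pre_judge_cards; infer_instance

def pvWitness_judge_cards : List String × List String := (["1", "2", "3", "4"], ["1", "3", "2", "5"])

def Spec_judge_cards (answer_cards : List String) (guess_cards : List String) (out : Int × Int) : Prop := out = judge_cards_alt answer_cards guess_cards
instance (answer_cards : List String) (guess_cards : List String) (out : Int × Int) : Decidable (Spec_judge_cards answer_cards guess_cards out) := by unfold Spec_judge_cards; infer_instance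

-- ===== CLAIM (what is proved, stated in full; the proofs are below) =====
def Claim_equal_judge_cards : Prop := ∀ (answer_cards : List String) (guess_cards : List String), Dom_judge_cards answer_cards guess_cards → Pre_judge_cards answer_cards guess_cards → Spec_judge_cards answer_cards guess_cards (judge_cards answer_cards guess_cards)

-- ===== LEMMAS AND PROOFS =====

-- the classify fold in closed form: hit count, counter of unmatched answer symbols, unmatched guess symbols
lemma pvClassify_go (L : List (String × String)) : ∀ (h : Int) (d : PySem.Dict String Int) (u : List String),
    L.foldl pvClassifyStep (h, d, u)
    = (h + (L.countP (fun p => p.1 == p.2) : Int),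
       ((L.filter (fun p => !(p.1 == p.2))).map (·.1)).foldl (fun d x => d.insert x (d.getD x 0 + 1)) d,
       u ++ (L.filter (fun p => !(p.1 == p.2))).map (·.2)) := by
  induction L with
  | nil => intro h d u; simp
  | cons p rest ih =>
    intro h d u
    rw [List.foldl_cons]
    by_cases hp : p.1 == p.2
    · have hp' : p.1 = p.2 := beq_iff_eq.mp hp
      rw [show pvClassifyStep (h, d, u) p = (h + 1, d, u) by simp [pvClassifyStep, hp'], ih]
      have h2 : (p :: rest).countP (fun p => p.1 == p.2) = rest.countP (fun p => p.1 == p.2) + 1 := by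
        simp [hp]
      have h3 : (p :: rest).filter (fun p => !(p.1 == p.2)) = rest.filter (fun p => !(p.1 == p.2)) := by
        simp [hp]
      rw [h2, h3]
      refine Prod.ext ?_ rfl
      push_cast; ring
    · rw [show pvClassifyStep (h, d, u) p
          = (h, d.insert p.1 (d.getD p.1 0 + 1), u ++ [p.2]) by
            have hp' : ¬ p.1 = p.2 := by simpa using hp
            simp [pvClassifyStep, hp'], ih]
      have h2 : (p :: rest).countP (fun p => p.1 == p.2) = rest.countP (fun p => p.1 == p.2) := by
        simp [hp]
      have h3 : (p :: rest).filter (fun p => !(p.1 == p.2)) = p :: rest.filter (fun p => !(p.1 == p.2)) := by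
        simp [hp]
      rw [h2, h3]
      simp [List.foldl_cons]

lemma pvClassify_spec (L : List (String × String)) :
    pvClassify L
    = ((L.countP (fun p => p.1 == p.2) : Int),
       PySem.Dict.counter ((L.filter (fun p => !(p.1 == p.2))).map (·.1)),
       (L.filter (fun p => !(p.1 == p.2))).map (·.2)) := by
  unfold pvClassify
  rw [pvClassify_go]
  simp [PySem.Dict.foldl_insert_getD_add_one_eq_counter]

-- the consume fold counts the multiset intersection of the pool with the unmatched guesses
lemma pvConsume_go (gs : List String) : ∀ (d : PySem.Dict String Int) (P : Multiset String) (b : Int),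
    (∀ k, d.getD k 0 = (P.count k : Int)) →
    (gs.foldl pvConsumeStep (d, b)).2 = b + ((P ∩ (gs : Multiset String)).card : Int) := by
  induction gs with
  | nil => intro d P b hd; simp
  | cons g rest ih =>
    intro d P b hd
    have hcast : ((g :: rest : List String) : Multiset String) = g ::ₘ (rest : Multiset String) := rfl
    rw [List.foldl_cons]
    by_cases hg : g ∈ P
    · have h1 : 1 ≤ P.count g := Multiset.one_le_count_iff_mem.mpr hg
      have hpos : 0 < d.getD g 0 := by rw [hd g]; exact_mod_cast h1
      rw [show pvConsumeStep (d, b) g = (d.insert g (d.getD g 0 - 1), b + 1) by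
        simp [pvConsumeStep, if_pos hpos]]
      have hstep : ∀ k, (d.insert g (d.getD g 0 - 1)).getD k 0 = ((P.erase g).count k : Int) := by
        intro k
        by_cases hk : k = g
        · rw [hk, PySem.Dict.getD_insert_self, hd g, Multiset.count_erase_self]
          have := h1
          push_cast [Nat.cast_sub this]
          ring
        · rw [PySem.Dict.getD_insert_of_ne _ _ _ hk, hd k, Multiset.count_erase_of_ne hk]
      have hinter : P ∩ ((g :: rest : List String) : Multiset String)
          = g ::ₘ ((P.erase g) ∩ (rest : Multiset String)) := by
        rw [hcast, Multiset.inter_comm, Multiset.cons_inter_of_pos _ hg, Multiset.inter_comm]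
      rw [ih _ (P.erase g) (b + 1) hstep, hinter]
      simp only [Multiset.card_cons]
      push_cast; ring
    · have hz : d.getD g 0 = 0 := by
        rw [hd g, Multiset.count_eq_zero_of_notMem hg]; rfl
      rw [show pvConsumeStep (d, b) g = (d, b) by simp [pvConsumeStep, hz]]
      have hinter : P ∩ ((g :: rest : List String) : Multiset String)
          = P ∩ (rest : Multiset String) := by
        rw [hcast, Multiset.inter_comm, Multiset.cons_inter_of_neg _ hg, Multiset.inter_comm]
      rw [ih _ P b hd, hinter]

lemma pvConsume_spec (gs xs : List String) :
    (pvConsume gs (PySem.Dict.counter xs)).2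
    = (((xs : Multiset String) ∩ (gs : Multiset String)).card : Int) := by
  unfold pvConsume
  rw [pvConsume_go gs (PySem.Dict.counter xs) (xs : Multiset String) 0
    (fun k => by rw [PySem.Dict.getD_counter]; simp)]
  simp

-- A's common sum = card of the multiset intersection of answers and guesses
lemma common_eq_inter_card (as gs : List String) :
    ((PySem.Dict.counter gs).keys.map
       (fun d => min ((PySem.Dict.counter as).getD d 0) ((PySem.Dict.counter gs).getD d 0))).sum
    = (((as : Multiset String) ∩ (gs : Multiset String)).card : Int) := by
  rw [PySem.Dict.keys_counter]
  have key : ∀ d : String, min ((PySem.Dict.counter as).getD d 0) ((PySem.Dict.counter gs).getD d 0)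
      = ((((as : Multiset String) ∩ (gs : Multiset String)).count d : Nat) : Int) := by
    intro d
    rw [PySem.Dict.getD_counter, PySem.Dict.getD_counter, Multiset.count_inter,
      Multiset.coe_count, Multiset.coe_count]
    push_cast
    rfl
  rw [List.map_congr_left (fun d _ => key d)]
  have hcomp : (PySem.Set.ofList gs).map
        (fun d => ((((as : Multiset String) ∩ (gs : Multiset String)).count d : Nat) : Int))
      = ((PySem.Set.ofList gs).map
        (fun d => ((as : Multiset String) ∩ (gs : Multiset String)).count d)).map Nat.cast := by
    simp [List.map_map, Function.comp]
  rw [hcomp, ← Nat.cast_list_sum]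
  congr 1
  have hnd := PySem.Set.nodup_ofList gs
  rw [← List.sum_toFinset _ hnd]
  have hsub : ((as : Multiset String) ∩ (gs : Multiset String)).toFinset ⊆ (PySem.Set.ofList gs).toFinset := by
    intro x hx
    rw [Multiset.mem_toFinset] at hx
    have hxg : x ∈ (gs : Multiset String) := Multiset.mem_of_le Multiset.inter_le_right hx
    rw [List.mem_toFinset, PySem.Set.mem_ofList]
    exact_mod_cast hxg
  rw [← Finset.sum_subset hsub (fun x _ hx => by
    rw [Multiset.count_eq_zero]
    intro hxI
    exact hx (Multiset.mem_toFinset.mpr hxI))]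
  exact Multiset.toFinset_sum_count_eq _

-- splitting a multiset intersection along a common part
lemma inter_add_add (u s t : Multiset String) : (u + s) ∩ (u + t) = u + s ∩ t := by
  ext a
  simp only [Multiset.count_inter, Multiset.count_add]
  omega

-- ===== VERDICT (by name: the statement is the Claim_ definition above) =====
theorem judge_cards_spec : Claim_equal_judge_cards := by
  intro as gs _ hpre
  unfold Pre_judge_cards at hpre
  show judge_cards as gs = judge_cards_alt as gs
  set L := as.zip gs with hL
  set M : List (String × String) := L.filter (fun p => p.1 == p.2) with hM
  set U : List (String × String) := L.filter (fun p => !(p.1 == p.2)) with hU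
  have hhitA : ((L.map (fun p => if p.1 == p.2 then (1 : Int) else 0)).sum : Int)
      = (L.countP (fun p => p.1 == p.2) : Int) := PySem.List.sum_map_ite_one_zero _ L
  have hfst : L.map Prod.fst = as := List.map_fst_zip hpre.le
  have hsnd : L.map Prod.snd = gs := List.map_snd_zip hpre.ge
  have hperm : (M ++ U).Perm L := List.filter_append_perm _ L
  have hMeq : M.map Prod.fst = M.map Prod.snd := by
    apply List.map_congr_left
    intro p hp
    exact beq_iff_eq.mp (List.mem_filter.mp hp).2
  have hasM : (as : Multiset String)
      = ((M.map Prod.snd : List String) : Multiset String) + ((U.map Prod.fst : List String) : Multiset String) := by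
    rw [← hfst, ← hMeq, Multiset.coe_add,
      show (M.map Prod.fst ++ U.map Prod.fst : List String) = (M ++ U).map Prod.fst from (List.map_append ..).symm]
    exact (Multiset.coe_eq_coe.mpr (hperm.map Prod.fst)).symm
  have hgsM : (gs : Multiset String)
      = ((M.map Prod.snd : List String) : Multiset String) + ((U.map Prod.snd : List String) : Multiset String) := by
    rw [← hsnd, Multiset.coe_add,
      show (M.map Prod.snd ++ U.map Prod.snd : List String) = (M ++ U).map Prod.snd from (List.map_append ..).symm]
    exact (Multiset.coe_eq_coe.mpr (hperm.map Prod.snd)).symm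
  have hcardM : ((M.map Prod.snd : List String) : Multiset String).card = L.countP (fun p => p.1 == p.2) := by
    simp [hM, List.countP_eq_length_filter]
  unfold judge_cards judge_cards_alt
  rw [pvClassify_spec]
  simp only
  rw [pvConsume_spec]
  refine Prod.ext ?_ ?_
  · simp only
    rw [hhitA]
  · simp only
    rw [hhitA, common_eq_inter_card]
    rw [show ((L.filter (fun p => !(p.1 == p.2))).map (·.1) : List String) = U.map Prod.fst from rfl,
        show ((L.filter (fun p => !(p.1 == p.2))).map (·.2) : List String) = U.map Prod.snd from rfl]
    rw [hasM, hgsM, inter_add_add]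
    simp only [Multiset.card_add, hcardM]
    push_cast
    ring
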